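-- pv_equiv track=rewrite | github.com/zhengyx-commits/AutoTestRes | scripts/python/lib/common/checkpoint/PlayerCheck_Base.py | check_consecutive_zeros
-- ===== SOURCE A (Python) =====
-- def check_consecutive_zeros(lst):
--     consecutive_count = 0
--     for i in range(3, len(lst)):
--         if lst[i] == '0':
--             consecutive_count += 1
--             if consecutive_count == 3:
--                 return False
--         else:
--             consecutive_count = 0
--     return True
-- ===== SOURCE B (Python) =====
-- def check_consecutive_zeros(lst):
--     # run-length walk: group the suffix lst[3:] into maximal runs of equal
--     # elements and fail on a run of '0' of length >= 3
--     tail = lst[3:]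
--     n = len(tail)
--     i = 0
--     while i < n:
--         j = i + 1
--         while j < n and tail[j] == tail[i]:
--             j += 1
--         if tail[i] == '0' and j - i >= 3:
--             return False
--         i = j
--     return True
-- ===== Notes on version B (the rewrite author's own statement) =====
-- stated objective: alternative
-- what changed: B slices the suffix lst[3:] and walks it as maximal runs of equal elements (run-length grouping), failing on a run of '0' of length >= 3, instead of A's index loop with a reset-on-mismatch counter.
import Mathlib
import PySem

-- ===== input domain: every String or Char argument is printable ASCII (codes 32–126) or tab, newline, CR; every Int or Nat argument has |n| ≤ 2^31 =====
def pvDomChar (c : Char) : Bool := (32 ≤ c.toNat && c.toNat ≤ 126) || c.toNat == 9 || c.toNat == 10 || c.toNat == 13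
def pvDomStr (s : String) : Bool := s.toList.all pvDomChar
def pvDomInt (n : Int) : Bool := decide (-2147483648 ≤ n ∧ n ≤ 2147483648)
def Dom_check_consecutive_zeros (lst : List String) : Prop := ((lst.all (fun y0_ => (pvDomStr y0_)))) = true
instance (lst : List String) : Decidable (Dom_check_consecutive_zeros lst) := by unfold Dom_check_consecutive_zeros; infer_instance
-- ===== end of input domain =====

-- B replaces A's reset-on-mismatch counter by a run-length (grouping) walk over the
-- suffix lst[3:]; same O(n) cost, different decomposition (objective: alternative).

-- ===== PORT A =====
-- index loop 'for i in range(3, len(lst))' with the consecutive counter; the early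
-- 'return False' is the false branch inside the recursion
def pvALoop (lst : List String) (i : Nat) (c : Int) : Bool :=
  if h : i < lst.length then
    if lst[i] == "0" then
      if c + 1 == 3 then false else pvALoop lst (i + 1) (c + 1)
    else pvALoop lst (i + 1) 0
  else true
termination_by lst.length - i

def check_consecutive_zeros (lst : List String) : Bool := pvALoop lst 3 0

-- ===== PORT B =====
-- walk the tail as maximal runs of equal elements; one step consumes one whole run
def pvRuns : List String → Bool
  | [] => true
  | x :: xs =>
    let run := xs.takeWhile (fun s => s == x)
    let rest := xs.dropWhile (fun s => s == x)
    if x == "0" && run.length + 1 ≥ 3 then false else pvRuns rest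
termination_by t => t.length
decreasing_by
  simpa using Nat.lt_succ_of_le (List.length_dropWhile_le (fun s => s == x) xs)

def check_consecutive_zeros_alt (lst : List String) : Bool :=
  pvRuns (PySem.List.slice lst (some 3) none)

-- ===== PRECONDITION & SPEC =====
def Spec_check_consecutive_zeros (lst : List String) (out : Bool) : Prop := out = check_consecutive_zeros_alt lst
instance (lst : List String) (out : Bool) : Decidable (Spec_check_consecutive_zeros lst out) := by unfold Spec_check_consecutive_zeros; infer_instance

-- ===== CLAIM (what is proved, stated in full; the proofs are below) =====
def Claim_equal_check_consecutive_zeros : Prop := ∀ (lst : List String), Dom_check_consecutive_zeros lst → Spec_check_consecutive_zeros lst (check_consecutive_zeros lst)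

-- ===== LEMMAS AND PROOFS =====

-- proof-side counter recursion on the remaining suffix
def pvAGo : List String → Int → Bool
  | [], _ => true
  | x :: xs, c =>
    if x == "0" then
      if c + 1 == 3 then false else pvAGo xs (c + 1)
    else pvAGo xs 0

theorem pvALoop_eq_pvAGo (lst : List String) (i : Nat) (c : Int) :
    pvALoop lst i c = pvAGo (lst.drop i) c := by
  induction i, c using pvALoop.induct lst with
  | case1 i c h hz hc =>
    rw [pvALoop, dif_pos h, List.drop_eq_getElem_cons h]
    simp [pvAGo, hz, hc]
  | case2 i c h hz hc ih =>
    rw [pvALoop, dif_pos h, List.drop_eq_getElem_cons h]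
    simp [pvAGo, hz, hc, ih]
  | case3 i c h hz ih =>
    rw [pvALoop, dif_pos h, List.drop_eq_getElem_cons h]
    simp [pvAGo, hz, ih]
  | case4 i c h =>
    rw [pvALoop, dif_neg h, List.drop_eq_nil_of_le (Nat.le_of_not_lt h)]
    simp [pvAGo]

-- crossing a run of zeros: the counter accumulates the run length (while it stays below 3)
theorem pvAGo_zeros (z : List String) (rest : List String) (c : Int)
    (hz : ∀ s ∈ z, s = "0") (hc : c < 3) :
    pvAGo (z ++ rest) c =
      if c + (z.length : Int) ≥ 3 then false else pvAGo rest (c + z.length) := by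
  induction z generalizing c with
  | nil => simp [Int.not_le.mpr hc]
  | cons x z ih =>
    have hx : x = "0" := hz x (by simp)
    subst hx
    have hzz : ∀ s ∈ z, s = "0" := fun s hs => hz s (List.mem_cons_of_mem _ hs)
    by_cases h3 : c + 1 = 3
    · have hge : c + ((("0" :: z).length : Nat) : Int) ≥ 3 := by
        simp only [List.length_cons]; omega
      rw [List.cons_append]
      simp only [pvAGo, beq_self_eq_true, if_true]
      rw [if_pos (beq_iff_eq.mpr h3), if_pos hge]
    · have hlt : c + 1 < 3 := by omega
      have he : c + 1 + (z.length : Int) = c + ((z.length + 1 : Nat) : Int) := by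
        push_cast; ring
      simp only [List.cons_append, pvAGo, beq_self_eq_true, if_true, List.length_cons]
      rw [if_neg (by simpa using h3), ih (c + 1) hzz hlt]
      rw [he]

-- crossing a run of non-zeros resets the counter at its first element
theorem pvAGo_nonzeros (z : List String) (rest : List String) (c : Int)
    (hz : ∀ s ∈ z, s ≠ "0") :
    pvAGo (z ++ rest) c = pvAGo rest (if z.isEmpty then c else 0) := by
  induction z generalizing c with
  | nil => simp
  | cons x z ih =>
    have hx : x ≠ "0" := hz x (by simp)
    have hzz : ∀ s ∈ z, s ≠ "0" := fun s hs => hz s (List.mem_cons_of_mem _ hs)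
    simp only [List.cons_append, pvAGo, List.isEmpty_cons]
    rw [if_neg (by simpa using hx), ih 0 hzz]
    cases z <;> simp

-- the counter is irrelevant when the list is empty or starts with a non-zero
theorem pvAGo_head_ne (t : List String) (c : Int)
    (h : t = [] ∨ ∃ x xs, t = x :: xs ∧ x ≠ "0") :
    pvAGo t c = pvAGo t 0 := by
  rcases h with h | ⟨x, xs, rfl, hx⟩
  · simp [h, pvAGo]
  · simp [pvAGo, hx]

theorem pvDropWhile_head_ne (x : String) (xs : List String) :
    xs.dropWhile (fun s => s == x) = [] ∨
      ∃ h t, xs.dropWhile (fun s => s == x) = h :: t ∧ h ≠ x := by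
  cases hrest : xs.dropWhile (fun s => s == x) with
  | nil => exact Or.inl rfl
  | cons h t =>
    refine Or.inr ⟨h, t, rfl, ?_⟩
    have := List.head_dropWhile_not (p := fun s => s == x) (l := xs) (by simp [hrest])
    simpa [hrest] using this

-- main bridge: counter scan = run-length walk
theorem pvAGo_eq_pvRuns (t : List String) : pvAGo t 0 = pvRuns t := by
  induction t using pvRuns.induct with
  | case1 => simp [pvAGo, pvRuns]
  | case2 x xs _ hfail =>
    simp only [pvRuns]
    rw [if_pos hfail]
    have hx : x = "0" := by
      have := (Bool.and_eq_true _ _).mp hfail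
      simpa using this.1
    have hlen : 3 ≤ (xs.takeWhile (fun s => s == x)).length + 1 := by
      have := (Bool.and_eq_true _ _).mp hfail
      simpa using this.2
    subst hx
    have hz : ∀ s ∈ xs.takeWhile (fun s => s == "0"), s = "0" := by
      intro s hs; simpa using List.mem_takeWhile_imp hs
    have step : pvAGo ("0" :: xs) 0 = pvAGo xs 1 := by simp [pvAGo]
    rw [step, ← List.takeWhile_append_dropWhile (p := fun s => s == "0") (l := xs),
      pvAGo_zeros _ _ 1 hz (by omega)]
    have : (1 : Int) + (xs.takeWhile (fun s => s == "0")).length ≥ 3 := by omega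
    simp [this]
  | case3 x xs _ _ hcond ih =>
    simp only [pvRuns]
    rw [if_neg hcond]
    by_cases hx : x = "0"
    · subst hx
      have hz : ∀ s ∈ xs.takeWhile (fun s => s == "0"), s = "0" := by
        intro s hs; simpa using List.mem_takeWhile_imp hs
      have hshort : ¬ ((xs.takeWhile (fun s => s == "0")).length + 1 ≥ 3) := by
        simpa using hcond
      have step : pvAGo ("0" :: xs) 0 = pvAGo xs 1 := by simp [pvAGo]
      have key : pvAGo xs 1 =
          if (1 : Int) + (xs.takeWhile (fun s => s == "0")).length ≥ 3 then false
          else pvAGo (xs.dropWhile (fun s => s == "0")) (1 + (xs.takeWhile (fun s => s == "0")).length) := by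
        conv_lhs => rw [← List.takeWhile_append_dropWhile (p := fun s => s == "0") (l := xs)]
        exact pvAGo_zeros _ _ 1 hz (by omega)
      have h1 : ¬ ((1 : Int) + (xs.takeWhile (fun s => s == "0")).length ≥ 3) := by
        omega
      rw [step, key, if_neg h1, pvAGo_head_ne _ _ ?hd]
      · exact ih
      case hd =>
        rcases pvDropWhile_head_ne "0" xs with h | ⟨h, t, heq, hne⟩
        · exact Or.inl h
        · exact Or.inr ⟨h, t, heq, hne⟩
    · have hnz : ∀ s ∈ xs.takeWhile (fun s => s == x), s ≠ "0" := by
        intro s hs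
        have : s = x := by simpa using List.mem_takeWhile_imp hs
        simpa [this] using hx
      have step : pvAGo (x :: xs) 0 = pvAGo xs 0 := by simp [pvAGo, hx]
      have key : pvAGo xs 0 = pvAGo (xs.dropWhile (fun s => s == x)) 0 := by
        conv_lhs => rw [← List.takeWhile_append_dropWhile (p := fun s => s == x) (l := xs)]
        rw [pvAGo_nonzeros _ _ 0 hnz]
        split <;> rfl
      rw [step, key]
      exact ih

-- ===== VERDICT (by name: the statement is the Claim_ definition above) =====
theorem check_consecutive_zeros_spec : Claim_equal_check_consecutive_zeros := by
  intro lst _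
  show check_consecutive_zeros lst = check_consecutive_zeros_alt lst
  unfold check_consecutive_zeros check_consecutive_zeros_alt
  rw [pvALoop_eq_pvAGo, pvAGo_eq_pvRuns]
  congr 1
  have h3 : ((3 : Int)) = ((3 : Nat) : Int) := rfl
  rw [h3, PySem.List.slice_from_natCast]
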